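-- pv_equiv track=rewrite | github.com/Alatius/latin-macronizer | latin_macronizer/scansion.py | scanverse
-- ===== SOURCE A (Python) =====
-- def scanverse(verse, automaton):
--     """Input: The "verse" is a complicated list of the format
--     [(tokenindex, [(penalty, scansion, accented), (penalty, scansion, accented), ...]), ...]
--     For example: [(0, [(0, 'L', 'in')]), (2, [(0, 'SL', 'no^va_'), (1, 'SS', 'no^va')]), ...]
--     It returns a tuple such as ([(0, 'in'), (2, 'no^va'), (4, 'fe^rt'), ...], 'DDSSDS') """
--
--     def scanverserecurse(verse, wordindex, automaton, oldnodeindex):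
--         if wordindex == len(verse):
--             return [], [], 0
--         (tokenindex, wordscansions) = verse[wordindex]
--         besttail = []
--         besttailfeet = []
--         besttailpenalty = 100
--         for (scanpenalty, scansion, accented) in wordscansions:
--             nodeindex = oldnodeindex
--             feet = []
--             finished = False
--             meterpenalty = 0
--             for syllable in scansion:
--                 (nodeindex, foot, meterpenaltypart) = automaton.get((nodeindex, syllable), (-1, "", 0))
--                 meterpenalty += meterpenaltypart
--                 if nodeindex == 0:
--                     finished = True
--                 feet.append(foot)
--             if nodeindex == -1 or finished and (nodeindex != 0 or wordindex != len(verse) - 1):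
--                 continue
--             tail, tailfeet, tailpenalty = scanverserecurse(verse, wordindex + 1, automaton, nodeindex)
--             if scanpenalty + meterpenalty + tailpenalty < besttailpenalty:
--                 besttail = [(tokenindex, accented)] + tail
--                 besttailfeet = feet + tailfeet
--                 besttailpenalty = scanpenalty + meterpenalty + tailpenalty
--         return besttail, besttailfeet, besttailpenalty
--
--     # enddef
--     indexaccentedpairs, feet, penalty = scanverserecurse(verse, 0, automaton, 0)
--     return indexaccentedpairs, "".join(feet)
-- ===== SOURCE B (Python) =====
-- def scanverse(verse, automaton):
--     """Bottom-up dynamic programming over (remaining words, automaton node):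
--     one table row per word, computed from the row of the next word, so each
--     (word, node) state is evaluated once."""
--     states = [0]
--     for (nxt, _foot, _pen) in automaton.values():
--         if nxt not in states:
--             states.append(nxt)
--     row = {s: ([], [], 0) for s in states}
--     last = True
--     for (tokenindex, wordscansions) in reversed(verse):
--         newrow = {}
--         for state in states:
--             best = ([], [], 100)
--             for (scanpenalty, scansion, accented) in wordscansions:
--                 node = state
--                 feet = []
--                 finished = False
--                 meterpenalty = 0
--                 for syllable in scansion:
--                     (node, foot, part) = automaton.get((node, syllable), (-1, "", 0))
--                     meterpenalty += part
--                     if node == 0: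
--                         finished = True
--                     feet.append(foot)
--                 if node == -1 or finished and (node != 0 or not last):
--                     continue
--                 tail, tailfeet, tailpenalty = row[node]
--                 total = scanpenalty + meterpenalty + tailpenalty
--                 if total < best[2]:
--                     best = ([(tokenindex, accented)] + tail, feet + tailfeet, total)
--             newrow[state] = best
--         row = newrow
--         last = False
--     pairs, feet, _penalty = row[0]
--     return (pairs, "".join(feet))
-- ===== Notes on version B (the rewrite author's own statement) =====
-- stated objective: alternative
-- what changed: Replaces A's branching recursion over scansion choices with bottom-up dynamic programming: one table row per word mapping each automaton node to the best (tail, feet, penalty) for the remaining suffix, so each (word, node) state is evaluated once instead of once per recursion path; this trades A's exponential worst case for a words*nodes table but was not measurably faster on the generated inputs.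
import Mathlib
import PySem

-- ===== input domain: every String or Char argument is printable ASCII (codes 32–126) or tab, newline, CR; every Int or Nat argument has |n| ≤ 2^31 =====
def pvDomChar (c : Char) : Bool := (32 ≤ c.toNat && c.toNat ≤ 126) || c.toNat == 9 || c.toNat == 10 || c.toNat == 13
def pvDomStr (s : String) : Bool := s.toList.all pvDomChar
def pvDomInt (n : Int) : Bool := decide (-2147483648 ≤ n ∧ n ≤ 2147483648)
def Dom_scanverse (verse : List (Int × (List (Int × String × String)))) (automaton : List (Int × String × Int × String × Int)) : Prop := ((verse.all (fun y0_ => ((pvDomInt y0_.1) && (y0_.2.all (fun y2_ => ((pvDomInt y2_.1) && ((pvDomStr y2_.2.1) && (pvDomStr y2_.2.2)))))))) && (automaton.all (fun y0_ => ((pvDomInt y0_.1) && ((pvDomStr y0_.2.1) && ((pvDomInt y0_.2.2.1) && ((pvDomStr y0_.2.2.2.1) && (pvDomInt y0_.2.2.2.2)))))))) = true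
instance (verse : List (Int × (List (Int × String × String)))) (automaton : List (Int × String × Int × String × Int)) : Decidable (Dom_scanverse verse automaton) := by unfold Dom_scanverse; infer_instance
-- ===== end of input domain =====

-- B computes the result by bottom-up dynamic programming on (remaining words, automaton node)
-- instead of A's branching recursion over scansion choices; same return value everywhere.

abbrev ScAuto := List (Int × String × Int × String × Int)
abbrev ScWord := Int × (List (Int × String × String))
abbrev ScRes := (List (Int × String)) × (List String) × Int

-- ===== PORT A =====
-- automaton.get((n, syllable), (-1, "", 0)) : first match in insertion order (dict convention)
def scAget (a : ScAuto) (n : Int) (c : Char) : Int × String × Int :=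
  match a with
  | [] => (-1, "", 0)
  | (k, s, t, f, p) :: rest =>
    if k = n ∧ s = String.ofList [c] then (t, f, p) else scAget rest n c

-- one iteration of 'for syllable in scansion' (state: node, feet, finished, meterpenalty);
-- shared by both ports because A's and B's Pythons carry the identical inner loop.
def scStep (a : ScAuto) (st : Int × List String × Bool × Int) (c : Char) : Int × List String × Bool × Int :=
  let r := scAget a st.1 c
  (r.1, st.2.1 ++ [r.2.1], st.2.2.1 || decide (r.1 = 0), st.2.2.2 + r.2.2)

def scWalk (a : ScAuto) (node : Int) (cs : List Char) : Int × List String × Bool × Int :=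
  cs.foldl (scStep a) (node, [], false, 0)

-- scanverserecurse (verse suffix instead of wordindex; 'rest ≠ []' is 'wordindex != len(verse)-1')
def scRecA (a : ScAuto) : List ScWord → Int → ScRes
  | [] => fun _ => ([], [], 0)
  | (tok, scans) :: rest => fun node =>
    scans.foldl
      (fun best sca =>
        let w := scWalk a node sca.2.1.toList
        if w.1 = -1 ∨ (w.2.2.1 = true ∧ (w.1 ≠ 0 ∨ rest ≠ [])) then best
        else
          let t := scRecA a rest w.1
          if sca.1 + w.2.2.2 + t.2.2 < best.2.2 then
            ((tok, sca.2.2) :: t.1, w.2.1 ++ t.2.1, sca.1 + w.2.2.2 + t.2.2)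
          else best)
      ([], [], 100)

def scanverse (verse : List (Int × (List (Int × String × String)))) (automaton : List (Int × String × Int × String × Int)) : (List (Int × String)) × String :=
  let r := scRecA automaton verse 0
  (r.1, PySem.Str.join "" r.2.1)

-- ===== PORT B =====
-- states = [0] plus every next-state of the automaton, in first-seen order
def scStates (a : ScAuto) : List Int :=
  a.foldl (fun st q => if q.2.2.1 ∈ st then st else st ++ [q.2.2.1]) [0]

-- the 'for (scanpenalty, scansion, accented) in wordscansions' loop of Source B; tail from the
-- DP row. Source B's row[node] always finds the key (see scRowsB_getD below), so getD is exact.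
def scBestFor (a : ScAuto) (last : Bool) (tok : Int) (scans : List (Int × String × String))
    (row : PySem.Dict Int ScRes) (state : Int) : ScRes :=
  scans.foldl
    (fun best sca =>
      let w := scWalk a state sca.2.1.toList
      if w.1 = -1 ∨ (w.2.2.1 = true ∧ (w.1 ≠ 0 ∨ last = false)) then best
      else
        let t := row.getD w.1 ([], [], 0)
        if sca.1 + w.2.2.2 + t.2.2 < best.2.2 then
          ((tok, sca.2.2) :: t.1, w.2.1 ++ t.2.1, sca.1 + w.2.2.2 + t.2.2)
        else best)
    ([], [], 100)

-- rows(words): DP table for a verse suffix, one entry per state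
def scRowsB (a : ScAuto) (states : List Int) : List ScWord → PySem.Dict Int ScRes
  | [] => states.foldl (fun d s => d.insert s (([], [], 0) : ScRes)) PySem.Dict.empty
  | (tok, scans) :: rest =>
    let row := scRowsB a states rest
    states.foldl (fun d s => d.insert s (scBestFor a rest.isEmpty tok scans row s)) PySem.Dict.empty

def scanverse_alt (verse : List (Int × (List (Int × String × String)))) (automaton : List (Int × String × Int × String × Int)) : (List (Int × String)) × String :=
  let states := scStates automaton
  let row := scRowsB automaton states verse
  let r := row.getD 0 ([], [], 0)
  (r.1, PySem.Str.join "" r.2.1)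

-- ===== PRECONDITION & SPEC =====
def Spec_scanverse (verse : List (Int × (List (Int × String × String)))) (automaton : List (Int × String × Int × String × Int)) (out : (List (Int × String)) × String) : Prop := out = scanverse_alt verse automaton
instance (verse : List (Int × (List (Int × String × String)))) (automaton : List (Int × String × Int × String × Int)) (out : (List (Int × String)) × String) : Decidable (Spec_scanverse verse automaton out) := by unfold Spec_scanverse; infer_instance

-- ===== CLAIM (what is proved, stated in full; the proofs are below) =====
def Claim_equal_scanverse : Prop := ∀ (verse : List (Int × (List (Int × String × String)))) (automaton : List (Int × String × Int × String × Int)), Dom_scanverse verse automaton → Spec_scanverse verse automaton (scanverse verse automaton)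

-- ===== LEMMAS AND PROOFS =====

-- membership in the states accumulator is preserved
theorem scStates_aux1 (l : ScAuto) (acc : List Int) (x : Int) (hx : x ∈ acc) :
    x ∈ l.foldl (fun st q => if q.2.2.1 ∈ st then st else st ++ [q.2.2.1]) acc := by
  induction l generalizing acc with
  | nil => exact hx
  | cons q rest ih =>
    simp only [List.foldl_cons]
    apply ih
    split
    · exact hx
    · exact List.mem_append_left _ hx

theorem zero_mem_scStates (a : ScAuto) : (0 : Int) ∈ scStates a :=
  scStates_aux1 a [0] 0 (by simp)

theorem scStates_aux2 (l : ScAuto) :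
    ∀ (acc : List Int) (q : Int × String × Int × String × Int), q ∈ l →
      q.2.2.1 ∈ l.foldl (fun st q => if q.2.2.1 ∈ st then st else st ++ [q.2.2.1]) acc := by
  induction l with
  | nil => intro acc q h; cases h
  | cons p rest ih =>
    intro acc q hq
    rcases List.mem_cons.mp hq with hq | hq
    · subst hq
      simp only [List.foldl_cons]
      apply scStates_aux1
      by_cases h : q.2.2.1 ∈ acc
      · simp [h]
      · simp [h]
    · simp only [List.foldl_cons]; exact ih _ q hq

theorem next_mem_scStates (a : ScAuto) (q : Int × String × Int × String × Int) (hq : q ∈ a) :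
    q.2.2.1 ∈ scStates a := scStates_aux2 a [0] q hq

theorem scAget_fst (a : ScAuto) (n : Int) (c : Char) :
    (scAget a n c).1 = -1 ∨ ∃ q ∈ a, (scAget a n c).1 = q.2.2.1 := by
  induction a with
  | nil => left; rfl
  | cons p rest ih =>
    simp only [scAget]
    split
    · right; exact ⟨p, by simp, rfl⟩
    · rcases ih with h | ⟨q, hq, h⟩
      · left; exact h
      · right; exact ⟨q, by simp [hq], h⟩

-- invariant: every node the walk reaches is -1 or a collected state
def scOk (a : ScAuto) (n : Int) : Prop := n = -1 ∨ n ∈ scStates a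

theorem scStep_ok (a : ScAuto) (st : Int × List String × Bool × Int) (c : Char) :
    scOk a (scStep a st c).1 := by
  rcases scAget_fst a st.1 c with h | ⟨q, hq, h⟩
  · left; exact h
  · right; rw [show (scStep a st c).1 = (scAget a st.1 c).1 from rfl, h]
    exact next_mem_scStates a q hq

theorem scFoldStep_ok (a : ScAuto) (cs : List Char) :
    ∀ st : Int × List String × Bool × Int, scOk a st.1 → scOk a (cs.foldl (scStep a) st).1 := by
  induction cs with
  | nil => intro st h; exact h
  | cons c cs ih => intro st _; exact ih (scStep a st c) (scStep_ok a st c)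

theorem scWalk_ok (a : ScAuto) (n : Int) (cs : List Char) (hn : n ∈ scStates a) :
    scOk a (scWalk a n cs).1 :=
  scFoldStep_ok a cs (n, [], false, 0) (Or.inr hn)

-- lookup into a row built by inserting f s for every s in states
theorem getD_fold_insert (states : List Int) (f : Int → ScRes) (d : PySem.Dict Int ScRes)
    (n : Int) (df : ScRes) :
    (states.foldl (fun d s => d.insert s (f s)) d).getD n df
      = if n ∈ states then f n else d.getD n df := by
  induction states generalizing d with
  | nil => simp
  | cons s rest ih =>
    simp only [List.foldl_cons]
    rw [ih]
    by_cases hr : n ∈ rest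
    · simp [hr]
    · by_cases hs : n = s
      · subst hs; simp [hr]
      · simp [hr, hs, PySem.Dict.getD_insert]

-- main invariant: the DP row for a suffix agrees with A's recursion on every collected state
theorem scRowsB_getD (a : ScAuto) (ws : List ScWord) (n : Int) (hn : n ∈ scStates a) :
    (scRowsB a (scStates a) ws).getD n ([], [], 0) = scRecA a ws n := by
  induction ws generalizing n with
  | nil =>
    simp only [scRowsB, scRecA, getD_fold_insert]
    split <;> simp
  | cons w rest ih =>
    obtain ⟨tok, scans⟩ := w
    simp only [scRowsB, getD_fold_insert, hn, if_pos, scRecA, scBestFor]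
    apply List.foldl_ext
    intro best sca _
    have hiff : ((scWalk a n sca.2.1.toList).1 = -1 ∨
          ((scWalk a n sca.2.1.toList).2.2.1 = true ∧
            ((scWalk a n sca.2.1.toList).1 ≠ 0 ∨ rest.isEmpty = false)))
        ↔ ((scWalk a n sca.2.1.toList).1 = -1 ∨
          ((scWalk a n sca.2.1.toList).2.2.1 = true ∧
            ((scWalk a n sca.2.1.toList).1 ≠ 0 ∨ rest ≠ []))) := by
      simp
    by_cases hc : (scWalk a n sca.2.1.toList).1 = -1 ∨
        ((scWalk a n sca.2.1.toList).2.2.1 = true ∧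
          ((scWalk a n sca.2.1.toList).1 ≠ 0 ∨ rest ≠ []))
    · rw [if_pos (hiff.mpr hc), if_pos hc]
    · rw [if_neg (fun h => hc (hiff.mp h)), if_neg hc]
      have hne : (scWalk a n sca.2.1.toList).1 ≠ -1 := fun h => hc (Or.inl h)
      have hmem : (scWalk a n sca.2.1.toList).1 ∈ scStates a := by
        rcases scWalk_ok a n sca.2.1.toList hn with h | h
        · exact absurd h hne
        · exact h
      rw [ih _ hmem]

-- ===== VERDICT (by name: the statement is the Claim_ definition above) =====
theorem scanverse_spec : Claim_equal_scanverse := by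
  intro verse automaton _dom
  unfold Spec_scanverse
  simp only [scanverse, scanverse_alt]
  rw [scRowsB_getD automaton verse 0 (zero_mem_scStates automaton)]
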